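-- pv_equiv track=rewrite | github.com/Ahsan728/Language_Coach | backend/services.py | _last_seen_lesson_id
-- ===== SOURCE A (Python) =====
-- def _last_seen_lesson_id(progress):
--     best = None  # (last_seen_iso, lesson_id)
--     for lid, p in (progress or {}).items():
--         ls = p.get('last_seen')
--         if not ls:
--             continue
--         if best is None or ls > best[0]:
--             best = (ls, lid)
--     return best[1] if best else None
-- ===== SOURCE B (Python) =====
-- def _last_seen_lesson_id(progress):
--     seen = [(lid, ls) for lid, p in (progress or {}).items() if (ls := p.get('last_seen'))]
--     seen.sort(key=lambda kv: kv[1], reverse=True)  # stable: first-encountered wins ties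
--     return seen[0][0] if seen else None
-- ===== Notes on version B (the rewrite author's own statement) =====
-- stated objective: alternative
-- what changed: A's single-pass running-best loop with a strict '>' comparison is replaced by collecting the truthy (lesson_id, last_seen) pairs, stably sorting them descending by last_seen, and returning the head's lesson_id (stability preserves A's first-wins tie-break).
import Mathlib
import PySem

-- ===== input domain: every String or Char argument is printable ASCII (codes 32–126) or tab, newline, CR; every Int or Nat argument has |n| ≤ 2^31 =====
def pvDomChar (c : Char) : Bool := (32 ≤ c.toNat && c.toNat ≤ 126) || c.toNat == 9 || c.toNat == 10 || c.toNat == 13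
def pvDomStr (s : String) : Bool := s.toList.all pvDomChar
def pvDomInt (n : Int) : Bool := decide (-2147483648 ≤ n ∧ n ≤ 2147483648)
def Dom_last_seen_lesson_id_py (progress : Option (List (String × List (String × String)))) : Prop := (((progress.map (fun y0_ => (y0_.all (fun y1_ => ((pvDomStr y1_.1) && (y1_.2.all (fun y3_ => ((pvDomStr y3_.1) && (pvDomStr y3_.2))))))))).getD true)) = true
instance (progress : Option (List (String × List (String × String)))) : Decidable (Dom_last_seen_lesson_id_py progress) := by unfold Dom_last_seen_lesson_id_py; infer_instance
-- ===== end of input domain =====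

-- B replaces A's running-best loop by filter + stable reverse sort + head ('alternative' decomposition, same result incl. ties).

-- ===== PORT A =====
-- A's loop body: skip entries whose 'last_seen' is missing or falsy (empty string), else keep the strictly greater one
def lslA_step (best : Option (String × String)) (lp : String × List (String × String)) : Option (String × String) :=
  match (PySem.Dict.ofList lp.2).get? "last_seen" with
  | none => best
  | some ls =>
    if ls = "" then best
    else match best with
      | none => some (ls, lp.1)
      | some b => if b.1 < ls then some (ls, lp.1) else best

def last_seen_lesson_id_py (progress : Option (List (String × List (String × String)))) : Option String :=
  match (progress.getD []).foldl lslA_step none with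
  | some b => some b.2
  | none => none

-- ===== PORT B =====
def last_seen_lesson_id_py_alt (progress : Option (List (String × List (String × String)))) : Option String :=
  let seen := (progress.getD []).filterMap (fun lp =>
    match (PySem.Dict.ofList lp.2).get? "last_seen" with
    | none => none
    | some ls => if ls = "" then none else some (lp.1, ls))
  match PySem.List.sorted seen (fun kv => kv.2) true with
  | [] => none
  | kv :: _ => some kv.1

-- ===== PRECONDITION & SPEC =====
def Spec_last_seen_lesson_id_py (progress : Option (List (String × List (String × String)))) (out : Option String) : Prop := out = last_seen_lesson_id_py_alt progress
instance (progress : Option (List (String × List (String × String)))) (out : Option String) : Decidable (Spec_last_seen_lesson_id_py progress out) := by unfold Spec_last_seen_lesson_id_py; infer_instance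

-- ===== CLAIM (what is proved, stated in full; the proofs are below) =====
def Claim_equal_last_seen_lesson_id_py : Prop := ∀ (progress : Option (List (String × List (String × String)))), Dom_last_seen_lesson_id_py progress → Spec_last_seen_lesson_id_py progress (last_seen_lesson_id_py progress)

-- ===== LEMMAS AND PROOFS =====
-- the loop over the kept (lid, last_seen) pairs, with the (ls, lid) accumulator of A
def lslP_step (best : Option (String × String)) (kv : String × String) : Option (String × String) :=
  match best with
  | none => some (kv.2, kv.1)
  | some b => if b.1 < kv.2 then some (kv.2, kv.1) else best

def lslFilter (lp : String × List (String × String)) : Option (String × String) :=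
  match (PySem.Dict.ofList lp.2).get? "last_seen" with
  | none => none
  | some ls => if ls = "" then none else some (lp.1, ls)

lemma lsl_foldA_eq_foldP (items : List (String × List (String × String))) (init : Option (String × String)) :
    items.foldl lslA_step init = (items.filterMap lslFilter).foldl lslP_step init := by
  induction items generalizing init with
  | nil => rfl
  | cons lp rest ih =>
    simp only [List.foldl_cons, List.filterMap_cons]
    cases h : (PySem.Dict.ofList lp.2).get? "last_seen" with
    | none => simp only [lslFilter, lslA_step, h]; exact ih init
    | some ls =>
      by_cases hls : ls = ""
      · simp only [lslFilter, lslA_step, h, hls]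
        exact ih init
      · simp only [lslFilter, lslA_step, h, if_neg hls, List.foldl_cons]
        cases init with
        | none => exact ih _
        | some b =>
          simp only [lslP_step]
          exact ih _

lemma lsl_foldP_eq_sorted_head (L : List (String × String)) :
    L.foldl lslP_step none =
      (match PySem.List.sorted L (fun kv => kv.2) true with
       | [] => none
       | kv :: _ => some (kv.2, kv.1)) := by
  induction L using List.reverseRecOn with
  | nil => rfl
  | append_singleton L x ih =>
    rw [List.foldl_append, ih]
    rw [PySem.List.sorted_rev_eq_foldl_insertBy (L ++ [x]) (fun kv => kv.2),
        List.foldl_append, ← PySem.List.sorted_rev_eq_foldl_insertBy L (fun kv => kv.2)]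
    simp only [List.foldl_cons, List.foldl_nil]
    cases hs : PySem.List.sorted L (fun kv => kv.2) true with
    | nil => rfl
    | cons y ys =>
      simp only [lslP_step, PySem.List.insertBy]
      by_cases h : y.2 < x.2
      · simp [h]
      · simp [h]

theorem lsl_main (progress : Option (List (String × List (String × String)))) :
    last_seen_lesson_id_py progress = last_seen_lesson_id_py_alt progress := by
  unfold last_seen_lesson_id_py last_seen_lesson_id_py_alt
  rw [lsl_foldA_eq_foldP]
  have : (progress.getD []).filterMap (fun lp =>
      match (PySem.Dict.ofList lp.2).get? "last_seen" with
      | none => none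
      | some ls => if ls = "" then none else some (lp.1, ls)) =
      (progress.getD []).filterMap lslFilter := rfl
  rw [this, lsl_foldP_eq_sorted_head]
  cases hs : PySem.List.sorted ((progress.getD []).filterMap lslFilter) (fun kv => kv.2) true <;> simp [hs]

-- ===== VERDICT (by name: the statement is the Claim_ definition above) =====
theorem last_seen_lesson_id_py_spec : Claim_equal_last_seen_lesson_id_py := by
  intro progress _
  exact lsl_main progress
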